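-- pv_equiv track=rewrite | github.com/mabrigos/docling-graph | docling_graph/core/extractors/contracts/delta/ir_normalizer.py | _list_segment_from_path
-- ===== SOURCE A (Python) =====
-- def _list_segment_from_path(path: str) -> str | None:
--     """Return the last list segment name from a canonical path (without []), if any."""
--     if not path:
--         return None
--     for part in reversed([p for p in path.split(".") if p]):
--         if part.endswith("[]"):
--             seg = part[:-2].strip()
--             if seg:
--                 return seg
--     return None
-- ===== SOURCE B (Python) =====
-- def _list_segment_from_path(path: str) -> str | None:
--     """Return the last list segment name from a canonical path (without []), if any."""
--     result = None
--     for part in path.split("."):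
--         if part.endswith("[]"):
--             seg = part[:-2].strip()
--             if seg:
--                 result = seg
--     return result
-- ===== Notes on version B (the rewrite author's own statement) =====
-- stated objective: simpler
-- what changed: Single forward pass accumulating the last qualifying segment instead of filter + reversed + early return, dropping the explicit empty-path guard and the non-empty-part filter (both redundant).
import Mathlib
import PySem

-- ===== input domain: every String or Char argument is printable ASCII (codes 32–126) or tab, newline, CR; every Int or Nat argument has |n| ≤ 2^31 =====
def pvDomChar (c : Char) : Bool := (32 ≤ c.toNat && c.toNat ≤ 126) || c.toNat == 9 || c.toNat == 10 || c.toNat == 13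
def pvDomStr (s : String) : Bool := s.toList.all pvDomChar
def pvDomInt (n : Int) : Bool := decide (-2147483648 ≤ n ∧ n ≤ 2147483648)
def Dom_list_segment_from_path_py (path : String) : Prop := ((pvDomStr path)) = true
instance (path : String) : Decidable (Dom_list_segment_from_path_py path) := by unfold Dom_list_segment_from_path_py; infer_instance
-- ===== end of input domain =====

-- B replaces A's filter + reversed + early-return scan by a single forward pass that
-- accumulates the last qualifying segment (simpler decomposition; same O(n) cost).


-- ===== PORT A =====
-- [p for p in path.split(".") if p]
def pvPartsA (path : String) : List String :=
  ((PySem.Str.split? path ".").getD []).filter (fun p => p ≠ "")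

-- the for-loop over reversed(parts) with early return
def pvLoopA : List String → Option String
  | [] => none
  | part :: rest =>
    if PySem.Str.endswith part "[]" then
      let seg := PySem.Str.strip (PySem.Str.slice part none (some (-2)))
      if seg ≠ "" then some seg else pvLoopA rest
    else pvLoopA rest

def list_segment_from_path_py (path : String) : Option String :=
  if path = "" then none
  else pvLoopA (pvPartsA path).reverse

-- ===== PORT B =====
def list_segment_from_path_py_alt (path : String) : Option String :=
  ((PySem.Str.split? path ".").getD []).foldl
    (fun result part =>
      if PySem.Str.endswith part "[]" then
        let seg := PySem.Str.strip (PySem.Str.slice part none (some (-2)))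
        if seg ≠ "" then some seg else result
      else result) none

-- ===== PRECONDITION & SPEC =====
def Spec_list_segment_from_path_py (path : String) (out : Option String) : Prop := out = list_segment_from_path_py_alt path
instance (path : String) (out : Option String) : Decidable (Spec_list_segment_from_path_py path out) := by unfold Spec_list_segment_from_path_py; infer_instance

-- ===== CLAIM (what is proved, stated in full; the proofs are below) =====
def Claim_equal_list_segment_from_path_py : Prop := ∀ (path : String), Dom_list_segment_from_path_py path → Spec_list_segment_from_path_py path (list_segment_from_path_py path)

-- ===== LEMMAS AND PROOFS =====

-- the per-part "match value": some seg iff the part qualifies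
def pvMatch (part : String) : Option String :=
  if PySem.Str.endswith part "[]" then
    let seg := PySem.Str.strip (PySem.Str.slice part none (some (-2)))
    if seg ≠ "" then some seg else none
  else none

theorem pvLoopA_eq_findSome? (l : List String) : pvLoopA l = l.findSome? pvMatch := by
  induction l with
  | nil => rfl
  | cons x xs ih =>
    simp only [pvLoopA, pvMatch, List.findSome?_cons]
    split_ifs <;> simp [ih]

theorem pvStep_eq (result : Option String) (part : String) :
    (if PySem.Str.endswith part "[]" then
       let seg := PySem.Str.strip (PySem.Str.slice part none (some (-2)))
       if seg ≠ "" then some seg else result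
     else result) = (pvMatch part).or result := by
  simp only [pvMatch]
  split_ifs <;> simp

theorem pvFoldl_eq (l : List String) (acc : Option String) :
    l.foldl (fun result part => (pvMatch part).or result) acc =
      (l.reverse.findSome? pvMatch).or acc := by
  induction l generalizing acc with
  | nil => rfl
  | cons x xs ih =>
    simp only [List.foldl_cons, ih, List.reverse_cons, List.findSome?_append]
    cases h : pvMatch x <;> cases h2 : xs.reverse.findSome? pvMatch <;>
      simp [h]

theorem pvFindSome?_filter (l : List String) :
    (l.filter (fun p => p ≠ "")).findSome? pvMatch = l.findSome? pvMatch := by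
  induction l with
  | nil => rfl
  | cons x xs ih =>
    by_cases hx : x = ""
    · subst hx
      rw [List.filter_cons_of_neg (by simp)]
      exact ih
    · rw [List.filter_cons_of_pos (by simp [hx]), List.findSome?_cons, List.findSome?_cons, ih]

-- ===== VERDICT (by name: the statement is the Claim_ definition above) =====
theorem list_segment_from_path_py_spec : Claim_equal_list_segment_from_path_py := by
  intro path _
  unfold Spec_list_segment_from_path_py list_segment_from_path_py list_segment_from_path_py_alt
  by_cases hp : path = ""
  · subst hp; decide
  · simp only [hp, if_false, pvLoopA_eq_findSome?, pvPartsA, pvStep_eq, pvFoldl_eq,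
      Option.or_none, ← List.filter_reverse, pvFindSome?_filter]
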